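-- pv_equiv track=rewrite | github.com/fengyu586/Leetcode | Array/54. Spiral Matrix.py | sprial_coords
-- ===== SOURCE A (Python) =====
-- def sprial_coords(r1, c1, r2, c2):
--     for c in range(c1, c2+1):
--         yield r1, c
--     for r in range(r1+1, r2+1):
--         yield r, c2
--     if r1 < r2 and c1 < c2:
--         for c in range(c2-1, c1, -1):
--             yield r2, c
--         for r in range(r2, r1, -1):
--             yield r, c1
-- ===== SOURCE B (Python) =====
-- def sprial_coords(r1, c1, r2, c2):
--     # Closed-form indexing: compute the four segment lengths once, then
--     # generate the k-th perimeter coordinate directly from k.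
--     top = max(c2 - c1 + 1, 0)
--     right = max(r2 - r1, 0)
--     closed = r1 < r2 and c1 < c2
--     bottom = c2 - c1 - 1 if closed else 0
--     left = r2 - r1 if closed else 0
--     for k in range(top + right + bottom + left):
--         if k < top:
--             yield r1, c1 + k
--         elif k < top + right:
--             yield r1 + 1 + (k - top), c2
--         elif k < top + right + bottom:
--             yield r2, c2 - 1 - (k - top - right)
--         else:
--             yield r2 - (k - top - right - bottom), c1
-- ===== Notes on version B (the rewrite author's own statement) =====
-- stated objective: alternative
-- what changed: B replaces A's four sequential yield loops (two ascending, two descending under a guard) by one pass over a single index range of the precomputed perimeter length, computing the k-th coordinate in closed form from k.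
import Mathlib
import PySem

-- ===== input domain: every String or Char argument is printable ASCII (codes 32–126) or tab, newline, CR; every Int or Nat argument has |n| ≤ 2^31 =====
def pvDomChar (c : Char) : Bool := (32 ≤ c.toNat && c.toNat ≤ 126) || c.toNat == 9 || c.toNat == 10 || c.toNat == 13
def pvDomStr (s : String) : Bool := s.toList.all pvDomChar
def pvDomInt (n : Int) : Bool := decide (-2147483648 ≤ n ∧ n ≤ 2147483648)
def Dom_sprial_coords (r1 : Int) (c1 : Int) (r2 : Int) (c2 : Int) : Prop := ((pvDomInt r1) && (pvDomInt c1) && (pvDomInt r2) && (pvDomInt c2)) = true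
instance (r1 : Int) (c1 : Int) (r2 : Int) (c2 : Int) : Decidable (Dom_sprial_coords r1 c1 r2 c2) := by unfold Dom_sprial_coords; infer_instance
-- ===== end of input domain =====

-- B generates the k-th perimeter coordinate in closed form from one index range
-- instead of A's four sequential loops; alternative decomposition, same cost.
-- A is a Python generator; both ports return the list of yielded pairs.

-- ===== PORT A =====
-- each 'for … yield' loop becomes a map over the same range, concatenated in order
def sprial_coords (r1 : Int) (c1 : Int) (r2 : Int) (c2 : Int) : List (Int × Int) :=
  ((PySem.List.pyRange c1 (c2 + 1) 1).map (fun c => (r1, c))) ++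
  ((PySem.List.pyRange (r1 + 1) (r2 + 1) 1).map (fun r => (r, c2))) ++
  (if r1 < r2 ∧ c1 < c2 then
      ((PySem.List.pyRange (c2 - 1) c1 (-1)).map (fun c => (r2, c))) ++
      ((PySem.List.pyRange r2 r1 (-1)).map (fun r => (r, c1)))
    else [])

-- ===== PORT B =====
def sprial_coords_alt (r1 : Int) (c1 : Int) (r2 : Int) (c2 : Int) : List (Int × Int) :=
  let top := max (c2 - c1 + 1) 0
  let right := max (r2 - r1) 0
  let bottom := if r1 < r2 ∧ c1 < c2 then c2 - c1 - 1 else 0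
  let left := if r1 < r2 ∧ c1 < c2 then r2 - r1 else 0
  (PySem.List.pyRange 0 (top + right + bottom + left) 1).map (fun k =>
    if k < top then (r1, c1 + k)
    else if k < top + right then (r1 + 1 + (k - top), c2)
    else if k < top + right + bottom then (r2, c2 - 1 - (k - top - right))
    else (r2 - (k - top - right - bottom), c1))

-- ===== PRECONDITION & SPEC =====
def Spec_sprial_coords (r1 : Int) (c1 : Int) (r2 : Int) (c2 : Int) (out : List (Int × Int)) : Prop := out = sprial_coords_alt r1 c1 r2 c2
instance (r1 : Int) (c1 : Int) (r2 : Int) (c2 : Int) (out : List (Int × Int)) : Decidable (Spec_sprial_coords r1 c1 r2 c2 out) := by unfold Spec_sprial_coords; infer_instance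

-- ===== CLAIM (what is proved, stated in full; the proofs are below) =====
def Claim_equal_sprial_coords : Prop := ∀ (r1 : Int) (c1 : Int) (r2 : Int) (c2 : Int), Dom_sprial_coords r1 c1 r2 c2 → Spec_sprial_coords r1 c1 r2 c2 (sprial_coords r1 c1 r2 c2)

-- ===== LEMMAS AND PROOFS =====

-- ===== VERDICT (by name: the statement is the Claim_ definition above) =====
-- split List.range over a sum of four lengths
theorem range_split4 {α : Type} (a b c d : Nat) (f : Nat → α) :
    (List.range (a + b + c + d)).map f =
      (List.range a).map f ++ (List.range b).map (fun k => f (a + k)) ++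
      (List.range c).map (fun k => f (a + b + k)) ++
      (List.range d).map (fun k => f (a + b + c + k)) := by
  simp [List.range_add, List.map_map, Function.comp_def, Nat.add_assoc, Nat.add_comm,
    Nat.add_left_comm]

-- evaluate B's indexing function on each of the four index blocks
theorem seg_congr {α : Type} (n : Nat) (f : Nat → α) (g : Nat → α)
    (h : ∀ k, k < n → f k = g k) :
    (List.range n).map f = (List.range n).map g := by
  apply List.map_congr_left
  intro k hk
  exact h k (List.mem_range.mp hk)

theorem sprial_coords_spec : Claim_equal_sprial_coords := by
  intro r1 c1 r2 c2 _
  show sprial_coords r1 c1 r2 c2 = sprial_coords_alt r1 c1 r2 c2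
  unfold sprial_coords sprial_coords_alt
  simp only []
  set T := max (c2 - c1 + 1) 0 with hT
  set R := max (r2 - r1) 0 with hR
  by_cases hcl : r1 < r2 ∧ c1 < c2
  · obtain ⟨h1, h2⟩ := hcl
    rw [if_pos ⟨h1, h2⟩, if_pos ⟨h1, h2⟩, if_pos ⟨h1, h2⟩,
        PySem.List.pyRange_one c1 (c2 + 1), PySem.List.pyRange_one (r1 + 1) (r2 + 1),
        PySem.List.pyRange_neg_one (c2 - 1) c1, PySem.List.pyRange_neg_one r2 r1,
        PySem.List.pyRange_one 0]
    have hN : ((T + R + (c2 - c1 - 1) + (r2 - r1)) - 0).toNat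
        = (c2 + 1 - c1).toNat + (r2 + 1 - (r1 + 1)).toNat + (c2 - 1 - c1).toNat
          + (r2 - r1).toNat := by omega
    rw [hN, range_split4]
    simp only [List.map_append, List.map_map, Function.comp_def, List.append_assoc]
    have hTv : T = c2 - c1 + 1 := by omega
    have hRv : R = r2 - r1 := by omega
    congr 1
    · apply seg_congr; intro k hk
      rw [if_pos (by push_cast; omega)]
      simp only [Prod.mk.injEq]
      constructor <;> push_cast <;> omega
    congr 1
    · apply seg_congr; intro k hk
      rw [if_neg (by push_cast; omega), if_pos (by push_cast; omega)]
      simp only [Prod.mk.injEq]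
      constructor <;> push_cast <;> omega
    congr 1
    · apply seg_congr; intro k hk
      rw [if_neg (by push_cast; omega), if_neg (by push_cast; omega),
          if_pos (by push_cast; omega)]
      simp only [Prod.mk.injEq]
      constructor <;> push_cast <;> omega
    · apply seg_congr; intro k hk
      rw [if_neg (by push_cast; omega), if_neg (by push_cast; omega),
          if_neg (by push_cast; omega)]
      simp only [Prod.mk.injEq]
      constructor <;> push_cast <;> omega
  · rw [if_neg hcl, if_neg hcl, if_neg hcl,
        PySem.List.pyRange_one c1 (c2 + 1), PySem.List.pyRange_one (r1 + 1) (r2 + 1),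
        PySem.List.pyRange_one 0]
    have hN : ((T + R + 0 + 0) - 0).toNat
        = (c2 + 1 - c1).toNat + (r2 + 1 - (r1 + 1)).toNat + 0 + 0 := by omega
    rw [hN, range_split4]
    simp only [List.range_zero, List.map_nil, List.append_nil, List.map_append,
      List.map_map, Function.comp_def]
    congr 1
    · apply seg_congr; intro k hk
      rw [if_pos (by push_cast; omega)]
      simp only [Prod.mk.injEq]
      constructor <;> push_cast <;> omega
    · apply seg_congr; intro k hk
      rw [if_neg (by push_cast; omega), if_pos (by push_cast; omega)]
      simp only [Prod.mk.injEq]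
      constructor <;> push_cast <;> omega
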